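-- pv_equiv track=rewrite | github.com/JimmyBelt/Alzheimer-s-Disease-classification-pipeline | feature_extraction.py | get_feature_groups
-- ===== SOURCE A (Python) =====
-- from typing import Dict, List, Tuple, Optional
--
-- def get_feature_groups(feature_names: List[str]) -> Dict[str, List[str]]:
--     """
--     Group features by type (image type and feature class)
--
--     Args:
--          feature_names: List of feature names
--
--     Returns:
--         Dictionary mapping group names to feature lists
--     """
--
--     groups = {}
--
--     # Image type
--     image_types = ['original', 'wavelet', 'log', 'square', 'squareroot',
--                    'logarithm', 'exponential', 'gradient', 'lbp-3d']
--
--     for img_type in image_types: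
--         groups[img_type] = [f for f in feature_names if f.lower().startswith(img_type)]
--
--     # Feature classes
--     feature_classes = ['firstorder', 'glcm', 'glrlm', 'glszm', 'gldm', 'ngtdm', 'shape']
--
--     for feat_class in feature_classes:
--         groups[feat_class] = [f for f in feature_names if feat_class in f.lower()]
--
--     return groups
-- ===== SOURCE B (Python) =====
-- from typing import Dict, List
--
-- def get_feature_groups(feature_names: List[str]) -> Dict[str, List[str]]:
--     """Group features by image type and feature class in a single pass."""
--     image_types = ['original', 'wavelet', 'log', 'square', 'squareroot',
--                    'logarithm', 'exponential', 'gradient', 'lbp-3d']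
--     feature_classes = ['firstorder', 'glcm', 'glrlm', 'glszm', 'gldm', 'ngtdm', 'shape']
--
--     # one bucket per group: (key, is_prefix_test, collected features)
--     buckets = [(k, True, []) for k in image_types] + \
--               [(k, False, []) for k in feature_classes]
--
--     for f in feature_names:
--         low = f.lower()
--         for key, is_prefix, lst in buckets:
--             if low.startswith(key) if is_prefix else key in low:
--                 lst.append(f)
--
--     return {key: lst for key, _, lst in buckets}
-- ===== Notes on version B (the rewrite author's own statement) =====
-- stated objective: alternative
-- what changed: B replaces A's sixteen per-group rescans of feature_names with a single feature-driven pass that dispatches each name into pre-created (key, test-kind, bucket) slots, preserving order and multi-membership.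
import Mathlib
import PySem

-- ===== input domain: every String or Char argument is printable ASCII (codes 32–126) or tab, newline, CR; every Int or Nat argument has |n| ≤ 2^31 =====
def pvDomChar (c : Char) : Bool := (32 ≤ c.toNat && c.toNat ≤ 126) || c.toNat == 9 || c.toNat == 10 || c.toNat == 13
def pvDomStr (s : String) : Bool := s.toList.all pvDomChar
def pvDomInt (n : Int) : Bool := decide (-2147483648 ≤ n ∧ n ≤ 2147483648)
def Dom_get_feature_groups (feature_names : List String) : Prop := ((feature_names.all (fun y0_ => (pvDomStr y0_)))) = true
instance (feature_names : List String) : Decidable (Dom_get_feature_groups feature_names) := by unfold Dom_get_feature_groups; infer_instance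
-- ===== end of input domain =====

-- B groups the features in one feature-driven pass over pre-created buckets instead of A's
-- per-group rescans of feature_names; same return value, stated as exact equivalence.

-- ===== PORT A =====
def pvImageTypes : List String :=
  ["original", "wavelet", "log", "square", "squareroot",
   "logarithm", "exponential", "gradient", "lbp-3d"]

def pvFeatureClasses : List String :=
  ["firstorder", "glcm", "glrlm", "glszm", "gldm", "ngtdm", "shape"]

def get_feature_groups (feature_names : List String) : List (String × List String) :=
  let groups : PySem.Dict String (List String) := PySem.Dict.empty
  let groups := pvImageTypes.foldl
    (fun g img_type =>
      g.insert img_type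
        (feature_names.filter (fun f => PySem.Str.startswith (PySem.Str.lower f) img_type))) groups
  let groups := pvFeatureClasses.foldl
    (fun g feat_class =>
      g.insert feat_class
        (feature_names.filter (fun f => PySem.Str.isIn feat_class (PySem.Str.lower f)))) groups
  groups.items

-- ===== PORT B =====
-- bucket test from Source B: prefix match for image types, substring match for feature classes
def pvTest (key : String) (isPrefix : Bool) (low : String) : Bool :=
  if isPrefix then PySem.Str.startswith low key else PySem.Str.isIn key low

def get_feature_groups_alt (feature_names : List String) : List (String × List String) :=
  let buckets : List (String × Bool × List String) :=
    pvImageTypes.map (fun k => (k, true, ([] : List String)))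
      ++ pvFeatureClasses.map (fun k => (k, false, ([] : List String)))
  let buckets := feature_names.foldl
    (fun bs f =>
      let low := PySem.Str.lower f
      bs.map (fun b => if pvTest b.1 b.2.1 low then (b.1, b.2.1, b.2.2 ++ [f]) else b)) buckets
  (PySem.Dict.ofList (buckets.map (fun b => (b.1, b.2.2)))).items

-- ===== PRECONDITION & SPEC =====
def Spec_get_feature_groups (feature_names : List String) (out : List (String × List String)) : Prop := out = get_feature_groups_alt feature_names
instance (feature_names : List String) (out : List (String × List String)) : Decidable (Spec_get_feature_groups feature_names out) := by unfold Spec_get_feature_groups; infer_instance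

-- ===== CLAIM (what is proved, stated in full; the proofs are below) =====
def Claim_equal_get_feature_groups : Prop := ∀ (feature_names : List String), Dom_get_feature_groups feature_names → Spec_get_feature_groups feature_names (get_feature_groups feature_names)

-- ===== LEMMAS AND PROOFS =====

-- B's single pass, characterised: each bucket ends with its original contents followed by
-- the features passing its test, in input order.
theorem pvFoldl_buckets (fns : List String) (bs : List (String × Bool × List String)) :
    fns.foldl
      (fun bs f =>
        let low := PySem.Str.lower f
        bs.map (fun b => if pvTest b.1 b.2.1 low then (b.1, b.2.1, b.2.2 ++ [f]) else b)) bs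
    = bs.map (fun b => (b.1, b.2.1, b.2.2 ++ fns.filter (fun f => pvTest b.1 b.2.1 (PySem.Str.lower f)))) := by
  induction fns generalizing bs with
  | nil => simp
  | cons f rest ih =>
    simp only [List.foldl_cons, ih, List.map_map]
    refine List.map_congr_left (fun b _ => ?_)
    simp only [Function.comp]
    split <;> simp_all

-- ===== VERDICT (by name: the statement is the Claim_ definition above) =====
theorem get_feature_groups_spec : Claim_equal_get_feature_groups := by
  intro fns _
  show get_feature_groups fns = get_feature_groups_alt fns
  simp only [get_feature_groups, get_feature_groups_alt, pvFoldl_buckets]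
  simp [pvImageTypes, pvFeatureClasses, pvTest, PySem.Dict.ofList, PySem.Dict.update,
        PySem.Dict.insert, PySem.Dict.contains, PySem.Dict.empty]
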